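-- pv_equiv track=rewrite | github.com/galaxyholly/meteor_lite | weatherGetter.py | sort_24
-- ===== SOURCE A (Python) =====
-- def sort_24(obj): # This is here to split the week long data sets into days for further processing in extend_hours()
--     x = 0
--     placeholderList = []
--     daysDict = {}
--     for i in range(len(obj)):
--         try:
--             if obj[i][2][8:10] == obj[i+1][2][8:10]: # If the dates are the same, add the x to the beginning of a 3 part [date,value,unit] list.
--                 placeholderList.append([obj[i][0], obj[i][1], obj[i][2], obj[i][3]])
--             elif obj[i][2][8:10] != obj[i+1][2][8:10]:
--                 placeholderList.append([obj[i][0], obj[i][1], obj[i][2], obj[i][3]]) # each element gets appended to the empty list until you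
--                 daysDict[str(x)] = [elt for elt in placeholderList] # have all the elements of a single day, which the list gets added to a dict keyed for that day
--                 placeholderList.clear() # list is cleared to start again.
--                 x += 1
--         except IndexError:
--             placeholderList.append([obj[i][0], obj[i][1], obj[i][2], obj[i][3]]) # each element gets appended to the empty list until you
--             daysDict[str(x)] = [elt for elt in placeholderList]
--     return daysDict # This will return a dictionary coded from 0:6 that will store all of the individual days of data for a data type.
-- ===== SOURCE B (Python) =====
-- def sort_24(obj):
--     return dict(_days(obj, 0))
--
-- def _days(obj, x):
--     # recursion on days: peel off the maximal prefix sharing the first row's date, recurse on the rest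
--     if not obj:
--         return []
--     run, rest = _split_run(obj[0][2][8:10], obj[1:])
--     day = [[e[0], e[1], e[2], e[3]] for e in [obj[0]] + run]
--     return [(str(x), day)] + _days(rest, x + 1)
--
-- def _split_run(k, obj):
--     # (maximal prefix of obj whose rows have date substring k, remainder)
--     if obj and obj[0][2][8:10] == k:
--         run, rest = _split_run(k, obj[1:])
--         return [obj[0]] + run, rest
--     return [], obj
-- ===== Notes on version B (the rewrite author's own statement) =====
-- stated objective: alternative
-- what changed: Replaces A's indexed single-pass loop (lookahead comparison obj[i+1], placeholder buffer, clear(), x counter and IndexError-driven final flush) with a recursive decomposition: repeatedly split off the maximal prefix of rows sharing the first row's date substring and recurse on the remainder, pairing each run with str(i).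
import Mathlib
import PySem

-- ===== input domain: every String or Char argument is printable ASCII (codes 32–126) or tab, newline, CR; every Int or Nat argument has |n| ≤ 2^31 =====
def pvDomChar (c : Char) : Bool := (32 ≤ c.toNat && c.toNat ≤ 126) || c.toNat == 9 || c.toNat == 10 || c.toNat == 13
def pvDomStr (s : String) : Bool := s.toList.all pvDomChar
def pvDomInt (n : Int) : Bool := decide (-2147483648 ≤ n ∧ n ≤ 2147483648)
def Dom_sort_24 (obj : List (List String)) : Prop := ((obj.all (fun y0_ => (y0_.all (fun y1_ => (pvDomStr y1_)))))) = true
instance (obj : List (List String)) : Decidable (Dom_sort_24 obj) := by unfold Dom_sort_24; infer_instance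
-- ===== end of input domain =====

-- B replaces A's counter/placeholder/flush loop (obj[i+1] lookahead, IndexError-driven final flush)
-- by a recursion that peels off the maximal same-date prefix and recurses on the remainder (same cost).
-- Pre_ excludes inputs on which A raises IndexError; return-value equivalence only (neither mutates obj).


-- ===== PORT A =====
-- [obj[i][0], obj[i][1], obj[i][2], obj[i][3]]  (indices in range under Pre_; getD is exact there)
def aRow (r : List String) : List String := [r.getD 0 "", r.getD 1 "", r.getD 2 "", r.getD 3 ""]
-- obj[i][2][8:10]
def aKey (r : List String) : String := PySem.Str.slice (r.getD 2 "") (some 8) (some 10)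

-- A's 'for i in range(len(obj))' walks the list comparing obj[i] with obj[i+1]; the obvious structural
-- recursion on the same state (x, placeholderList, daysDict): two elements visible = the try branch,
-- one element left = obj[i+1] raises IndexError = the except branch, state exactly A's.
def aGo (l : List (List String)) (x : Int) (ph : List (List String))
    (d : PySem.Dict String (List (List String))) : PySem.Dict String (List (List String)) :=
  match l with
  | [] => d
  | [r] => d.insert (PySem.Int.toStr x) (ph ++ [aRow r])
  | r :: r2 :: rest =>
    if aKey r == aKey r2 then
      aGo (r2 :: rest) x (ph ++ [aRow r]) d
    else
      aGo (r2 :: rest) (x + 1) [] (d.insert (PySem.Int.toStr x) (ph ++ [aRow r]))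

def sort_24 (obj : List (List String)) : List (String × List (List String)) :=
  (aGo obj 0 [] PySem.Dict.empty).items

-- ===== PORT B =====
def bRow (r : List String) : List String := [r.getD 0 "", r.getD 1 "", r.getD 2 "", r.getD 3 ""]
def bKey (r : List String) : String := PySem.Str.slice (r.getD 2 "") (some 8) (some 10)

-- _split_run(k, obj): (maximal prefix of obj whose rows have date substring k, remainder)
def bSplit (k : String) (l : List (List String)) : List (List String) × List (List String) :=
  match l with
  | [] => ([], [])
  | e :: rest =>
    if bKey e == k then
      let p := bSplit k rest
      (e :: p.1, p.2)
    else ([], e :: rest)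

theorem bSplit_len (k : String) (l : List (List String)) : (bSplit k l).2.length ≤ l.length := by
  induction l with
  | nil => simp [bSplit]
  | cons e rest ih =>
    simp only [bSplit]
    split
    · exact le_trans ih (by simp)
    · simp

-- _days(obj, x): peel off the maximal same-date prefix, pair it (copied as 4-field rows) with str(x),
-- recurse on the remainder
def bDays (obj : List (List String)) (x : Int) : List (String × List (List String)) :=
  match h : obj with
  | [] => []
  | r :: rest =>
    (PySem.Int.toStr x, (r :: (bSplit (bKey r) rest).1).map bRow)
      :: bDays (bSplit (bKey r) rest).2 (x + 1)
termination_by obj.length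
decreasing_by
  have := bSplit_len (bKey r) rest
  simp; omega

-- dict(_days(obj, 0)): the keys str(0), str(1), … are pairwise distinct, so the dict is exactly
-- this association list in insertion order.
def sort_24_alt (obj : List (List String)) : List (String × List (List String)) :=
  bDays obj 0

-- ===== PRECONDITION & SPEC =====
-- A raises IndexError (obj[i][2] or obj[i][3], re-raised inside the except handler) on any row with
-- fewer than 4 fields; exactly those inputs are excluded. B raises there too.
def Pre_sort_24 (obj : List (List String)) : Prop := ∀ r ∈ obj, 4 ≤ r.length
instance (obj : List (List String)) : Decidable (Pre_sort_24 obj) := by unfold Pre_sort_24; infer_instance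
def pvWitness_sort_24 : List (List String) :=
  [["t", "1", "2024-01-01 00", "C"], ["t", "2", "2024-01-02 00", "C"]]
def Spec_sort_24 (obj : List (List String)) (out : List (String × List (List String))) : Prop := out = sort_24_alt obj
instance (obj : List (List String)) (out : List (String × List (List String))) : Decidable (Spec_sort_24 obj out) := by unfold Spec_sort_24; infer_instance

-- ===== CLAIM (what is proved, stated in full; the proofs are below) =====
def Claim_equal_sort_24 : Prop := ∀ (obj : List (List String)), Dom_sort_24 obj → Pre_sort_24 obj → Spec_sort_24 obj (sort_24 obj)

-- ===== LEMMAS AND PROOFS =====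

-- str(x) is injective on the non-negative integers -------------------------------------------------
theorem pvToDigitsCore_fuel (n : Nat) : ∀ (f f' : Nat) (acc : List Char), n < f → n < f' →
    Nat.toDigitsCore 10 f n acc = Nat.toDigitsCore 10 f' n acc := by
  induction n using Nat.strong_induction_on with
  | _ n ih =>
    intro f f' acc hf hf'
    match f, f' with
    | fa + 1, fb + 1 =>
      simp only [Nat.toDigitsCore]
      by_cases h0 : n / 10 = 0
      · simp [h0]
      · simp only [h0, if_false]
        have h1 : n / 10 < n := Nat.div_lt_self (by omega) (by omega)
        exact ih (n / 10) h1 fa fb _ (by omega) (by omega)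
theorem pvToDigitsCore_append (b f : Nat) : ∀ (n : Nat) (acc : List Char),
    Nat.toDigitsCore b f n acc = Nat.toDigitsCore b f n [] ++ acc := by
  induction f with
  | zero => intro n acc; simp [Nat.toDigitsCore]
  | succ f ih =>
    intro n acc
    simp only [Nat.toDigitsCore]
    by_cases h : n / b = 0
    · simp [h]
    · simp only [h, if_false]
      rw [ih (n / b) (Nat.digitChar (n % b) :: acc), ih (n / b) [Nat.digitChar (n % b)]]
      simp

def pvDecode (l : List Char) : Nat := l.foldl (fun a c => 10 * a + (c.toNat - 48)) 0

theorem pvDecode_append (l : List Char) (c : Char) :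
    pvDecode (l ++ [c]) = 10 * pvDecode l + (c.toNat - 48) := by
  simp [pvDecode, List.foldl_append]

theorem pvDigitChar_val (d : Nat) (h : d < 10) : (Nat.digitChar d).toNat - 48 = d := by
  interval_cases d <;> rfl

theorem pvDecode_toDigits (n : Nat) : pvDecode (Nat.toDigits 10 n) = n := by
  induction n using Nat.strong_induction_on with
  | _ n ih =>
    by_cases h : n < 10
    · have h0 : n / 10 = 0 := Nat.div_eq_of_lt h
      have hm : n % 10 = n := Nat.mod_eq_of_lt h
      simp only [Nat.toDigits, Nat.toDigitsCore, h0, if_true, hm]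
      simpa [pvDecode] using pvDigitChar_val n h
    · have h0 : n / 10 ≠ 0 := by omega
      have h1 : n / 10 < n := Nat.div_lt_self (by omega) (by omega)
      have : Nat.toDigits 10 n = Nat.toDigits 10 (n / 10) ++ [Nat.digitChar (n % 10)] := by
        have e1 : Nat.toDigits 10 n = Nat.toDigitsCore 10 n (n / 10) [Nat.digitChar (n % 10)] := by
          simp only [Nat.toDigits, Nat.toDigitsCore, h0, if_false]
        rw [e1, pvToDigitsCore_append,
          pvToDigitsCore_fuel (n / 10) n (n / 10 + 1) [] (by omega) (by omega)]
        rfl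
      rw [this, pvDecode_append, ih (n / 10) h1, pvDigitChar_val _ (Nat.mod_lt _ (by omega))]
      omega

theorem pvToStr_inj {x y : Int} (hx : 0 ≤ x) (hy : 0 ≤ y)
    (h : PySem.Int.toStr x = PySem.Int.toStr y) : x = y := by
  have h2 : PySem.Int.toChars x = PySem.Int.toChars y := by
    rw [← PySem.Int.toList_toStr, ← PySem.Int.toList_toStr, h]
  simp only [PySem.Int.toChars, if_neg (by omega : ¬ x < 0), if_neg (by omega : ¬ y < 0)] at h2
  have := congrArg pvDecode h2
  rw [pvDecode_toDigits, pvDecode_toDigits] at this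
  omega

-- the canonical run-splitting both versions compute ------------------------------------------------
def pvRuns (l : List (List String)) : List (List (List String)) :=
  match l with
  | [] => []
  | a :: s =>
    match pvRuns s with
    | [] => [[a]]
    | g :: gs => if aKey (g.getD 0 []) == aKey a then (a :: g) :: gs else [a] :: g :: gs

theorem pvRuns_head (s : List (List String)) (a : List String) :
    ∃ t gs, pvRuns (a :: s) = (a :: t) :: gs := by
  cases hr : pvRuns s with
  | nil => exact ⟨[], [], by simp [pvRuns, hr]⟩
  | cons g gs =>
    by_cases hk : aKey (g[0]?.getD []) = aKey a
    · exact ⟨g, gs, by simp [pvRuns, hr, hk]⟩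
    · exact ⟨[], g :: gs, by simp [pvRuns, hr, hk]⟩

-- A's loop computes pvRuns, numbered from x ---------------------------------------------------------
def pvNumbered (x : Int) (gs : List (List (List String))) : List (String × List (List String)) :=
  match gs with
  | [] => []
  | g :: gs => (PySem.Int.toStr x, g) :: pvNumbered (x + 1) gs

set_option maxHeartbeats 1000000 in
theorem pvAGo_items (l : List (List String)) : ∀ (g : List (List String)) gs (x : Int)
    (ph : List (List String)) (d : PySem.Dict String (List (List String))),
    pvRuns l = g :: gs → 0 ≤ x →
    (∀ y : Int, x ≤ y → d.contains (PySem.Int.toStr y) = false) →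
    (aGo l x ph d).items =
      d.items ++ pvNumbered x ((ph ++ g.map aRow) :: gs.map (List.map aRow)) := by
  induction l with
  | nil => intro g gs x ph d h hx hf; simp [pvRuns] at h
  | cons r rest ih =>
    intro g gs x ph d h hx hf
    cases rest with
    | nil =>
      have hg : pvRuns [r] = [r] :: ([] : List (List (List String))) := rfl
      rw [hg] at h
      injection h with h1 h2
      subst h1; subst h2
      simp only [aGo, pvNumbered]
      rw [PySem.Dict.items_insert_of_not_contains _ _ (hf x le_rfl)]
      simp [aRow, pvNumbered]
    | cons r2 rest2 =>
      obtain ⟨t, gs2, hr⟩ := pvRuns_head rest2 r2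
      by_cases hk : aKey r = aKey r2
      · have hl : pvRuns (r :: r2 :: rest2) = (r :: r2 :: t) :: gs2 := by
          conv_lhs => rw [pvRuns.eq_def]
          simp only []
          rw [hr]
          simp [hk]
        rw [hl] at h
        injection h with h1 h2
        subst h1; subst h2
        simp only [aGo, beq_iff_eq, hk, if_true]
        rw [ih (r2 :: t) gs2 x (ph ++ [aRow r]) d hr hx hf]
        simp
      · have hl : pvRuns (r :: r2 :: rest2) = [r] :: (r2 :: t) :: gs2 := by
          conv_lhs => rw [pvRuns.eq_def]
          simp only []
          rw [hr]
          simp [Ne.symm hk]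
        rw [hl] at h
        injection h with h1 h2
        subst h1; subst h2
        have hne : (aKey r == aKey r2) = false := by simp [hk]
        simp only [aGo, hne, Bool.false_eq_true, if_false]
        have hf' : ∀ y : Int, x + 1 ≤ y →
            (d.insert (PySem.Int.toStr x) (ph ++ [aRow r])).contains (PySem.Int.toStr y) = false := by
          intro y hy
          rw [PySem.Dict.contains_insert]
          have h1 : (PySem.Int.toStr y == PySem.Int.toStr x) = false := by
            simp only [beq_eq_false_iff_ne, ne_eq]
            intro hc
            have := pvToStr_inj (by omega) hx hc
            omega
          rw [h1, hf y (by omega)]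
          rfl
        rw [ih (r2 :: t) gs2 (x + 1) [] _ hr (by omega) hf']
        rw [PySem.Dict.items_insert_of_not_contains _ _ (hf x le_rfl)]
        simp [pvNumbered]

-- B's recursion computes pvRuns too ----------------------------------------------------------------
theorem pvRuns_cons (rest : List (List String)) : ∀ (r : List String),
    pvRuns (r :: rest) =
      (r :: (bSplit (aKey r) rest).1) :: pvRuns (bSplit (aKey r) rest).2 := by
  induction rest with
  | nil => intro r; simp [pvRuns, bSplit]
  | cons e rest2 ih =>
    intro r
    by_cases hk : aKey e = aKey r
    · have hsp : bSplit (aKey r) (e :: rest2) =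
          (e :: (bSplit (aKey r) rest2).1, (bSplit (aKey r) rest2).2) := by
        simp [bSplit, bKey, aKey] at *
        simp [hk]
      have ihr := ih e
      rw [hk] at ihr
      conv_lhs => rw [pvRuns.eq_def]
      simp only []
      rw [ihr]
      simp [hk, hsp]
    · have hsp : bSplit (aKey r) (e :: rest2) = ([], e :: rest2) := by
        have hk' : ¬ bKey e = aKey r := by simpa [bKey, aKey, List.getD] using hk
        simp [bSplit, hk']
      obtain ⟨t, gs, hr⟩ := pvRuns_head rest2 e
      conv_lhs => rw [pvRuns.eq_def]
      simp only []
      rw [hr]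
      simp [hk, hsp, hr]

theorem pvBDays_eq (n : Nat) : ∀ (obj : List (List String)) (x : Int), obj.length ≤ n →
    bDays obj x = pvNumbered x ((pvRuns obj).map (List.map bRow)) := by
  induction n with
  | zero =>
    intro obj x h
    have : obj = [] := List.eq_nil_of_length_eq_zero (by omega)
    subst this; simp [bDays, pvRuns, pvNumbered]
  | succ n ih =>
    intro obj x h
    cases obj with
    | nil => simp [bDays, pvRuns, pvNumbered]
    | cons r rest =>
      rw [bDays]
      have hrec : (bSplit (bKey r) rest).2.length ≤ n := by
        have := bSplit_len (bKey r) rest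
        simp at h; omega
      rw [ih _ (x + 1) hrec]
      have hk : bKey r = aKey r := rfl
      rw [pvRuns_cons rest r, ← hk]
      simp [pvNumbered]

-- ===== VERDICT (by name: the statement is the Claim_ definition above) =====
theorem sort_24_spec : Claim_equal_sort_24 := by
  intro obj _dom _pre
  unfold Spec_sort_24 sort_24 sort_24_alt
  rw [pvBDays_eq obj.length obj 0 le_rfl]
  have hrow : List.map bRow = List.map aRow := rfl
  cases obj with
  | nil => rfl
  | cons r rest =>
    obtain ⟨t, gs, hr⟩ := pvRuns_head rest r
    rw [pvAGo_items (r :: rest) (r :: t) gs 0 [] PySem.Dict.empty hr le_rfl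
      (fun y _ => PySem.Dict.contains_empty _)]
    rw [hr, hrow]
    simp [PySem.Dict.empty]
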